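-- pv_equiv track=rewrite | github.com/IsaenkovDanil/LFU_CACHE | perf.py | calculate_perfect_cache_hits
-- ===== SOURCE A (Python) =====
-- def calculate_perfect_cache_hits(buffer_size, input_size, input_buffer)->int:
--     if len(input_buffer) != input_size:
--         return -1
--     hits = 0
--     cache = []
--
--     for i in range(len(input_buffer)):
--         if input_buffer[i] in [j[0] for j in cache]:
--             hits += 1
--         else:
--             cache.append([input_buffer[i], 0])
--         for j in range(len(cache)):
--             if cache[j][0] not in input_buffer[i+1::]:
--                 cache[j][1] = len(input_buffer[i+1::])
--             else:
--                 cache[j][1] = input_buffer[i+1::].index(cache[j][0])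
--         cache = sorted(cache,key = lambda x: x[1])
--
--         if len(cache) > buffer_size:
--             cache.pop()
--
--     return hits
-- ===== SOURCE B (Python) =====
-- def calculate_perfect_cache_hits(buffer_size, input_size, input_buffer) -> int:
--     if len(input_buffer) != input_size:
--         return -1
--     n = len(input_buffer)
--
--     # Backward pass: nxt[i] = position of the next occurrence of input_buffer[i]
--     # after i, or n if there is none.
--     nxt_rev = []
--     last = {}
--     for i in range(n - 1, -1, -1):
--         nxt_rev.append(last.get(input_buffer[i], n))
--         last[input_buffer[i]] = i
--     nxt = nxt_rev[::-1]
--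
--     hits = 0
--     cache = []  # (value, absolute position of its next use), kept re-sorted by that position
--     for i in range(n):
--         v = input_buffer[i]
--         hit = False
--         new_cache = []
--         for e in cache:
--             if e[0] == v:
--                 hit = True
--                 new_cache.append((v, nxt[i]))
--             else:
--                 new_cache.append(e)
--         if hit:
--             hits += 1
--         else:
--             new_cache.append((v, nxt[i]))
--         new_cache.sort(key=lambda e: e[1])
--         if len(new_cache) > buffer_size:
--             new_cache.pop()
--         cache = new_cache
--     return hits
-- ===== Notes on version B (the rewrite author's own statement) =====
-- stated objective: alternative
-- what changed: Instead of re-scanning the whole remaining input for every cache entry at every step (slice + .index per entry) and re-sorting recomputed relative distances, B precomputes each position's next-occurrence index in one backward pass with a dict and maintains the cache as (value, absolute next-use position) pairs, updating only the accessed entry's key per step before the stable re-sort.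
import Mathlib
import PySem

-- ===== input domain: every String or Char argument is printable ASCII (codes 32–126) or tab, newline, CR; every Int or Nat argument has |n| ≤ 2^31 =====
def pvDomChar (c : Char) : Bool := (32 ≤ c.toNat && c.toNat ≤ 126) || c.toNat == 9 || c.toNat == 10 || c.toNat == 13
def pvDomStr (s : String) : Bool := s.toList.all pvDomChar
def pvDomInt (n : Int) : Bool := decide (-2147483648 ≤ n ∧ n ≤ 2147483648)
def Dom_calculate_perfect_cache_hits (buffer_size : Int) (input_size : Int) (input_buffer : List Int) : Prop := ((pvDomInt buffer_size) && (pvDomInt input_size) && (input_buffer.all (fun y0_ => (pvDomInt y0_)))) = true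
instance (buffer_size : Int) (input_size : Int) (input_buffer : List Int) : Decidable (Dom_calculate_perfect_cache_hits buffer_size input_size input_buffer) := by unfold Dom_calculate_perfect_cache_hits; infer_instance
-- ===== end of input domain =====

-- B replaces A's per-entry rescans of the remaining input (slice + .index for every
-- cache entry at every step) by a single backward precompute of next-occurrence
-- positions and an incrementally maintained (value, next-use position) cache.

-- ===== PORT A =====
-- distance of w in the remaining input t: t.index(w), or len(t) if absent
def pvADist (t : List Int) (w : Int) : Int :=
  match PySem.List.index? t w with
  | none => (t.length : Int)
  | some k => (k : Int)

-- the for-i loop of A, consuming the remaining input; cache entries are [value, dist]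
def pvALoop (buffer_size : Int) : List Int → Int → List (Int × Int) → Int
  | [], hits, _ => hits
  | v :: t, hits, cache =>
    let p := if v ∈ cache.map (fun e => e.1) then (hits + 1, cache)
             else (hits, cache ++ [(v, 0)])
    let c2 := p.2.map (fun e => (e.1, pvADist t e.1))
    let c3 := PySem.List.sorted c2 (fun e => e.2) false
    let c4 := if buffer_size < (c3.length : Int) then c3.dropLast else c3
    pvALoop buffer_size t p.1 c4

def calculate_perfect_cache_hits (buffer_size : Int) (input_size : Int) (input_buffer : List Int) : Int :=
  if (input_buffer.length : Int) ≠ input_size then -1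
  else pvALoop buffer_size input_buffer 0 []

-- ===== PORT B =====
-- backward pass of B: builds nxt_rev, iterating positions i = n-1 … 0 with dict `last`
def pvBNxt (n : Int) : List Int → Int → PySem.Dict Int Int → List Int
  | [], _, _ => []
  | v :: rest, i, last =>
      PySem.Dict.getD last v n :: pvBNxt n rest (i - 1) (PySem.Dict.insert last v i)

-- the for-i loop of B, consuming input and nxt in parallel; cache entries are
-- (value, absolute position of next use)
def pvBLoop (buffer_size : Int) : List Int → List Int → Int → List (Int × Int) → Int
  | v :: t, nv :: nt, hits, cache =>
    let r := cache.foldl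
      (fun (s : Bool × List (Int × Int)) e =>
        if e.1 == v then (true, s.2 ++ [(v, nv)]) else (s.1, s.2 ++ [e]))
      (false, [])
    let hits' := if r.1 then hits + 1 else hits
    let c1 := if r.1 then r.2 else r.2 ++ [(v, nv)]
    let c2 := PySem.List.sorted c1 (fun e => e.2) false
    let c3 := if buffer_size < (c2.length : Int) then c2.dropLast else c2
    pvBLoop buffer_size t nt hits' c3
  | _, _, hits, _ => hits

def calculate_perfect_cache_hits_alt (buffer_size : Int) (input_size : Int) (input_buffer : List Int) : Int :=
  if (input_buffer.length : Int) ≠ input_size then -1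
  else
    let n : Int := (input_buffer.length : Int)
    let nxt := (pvBNxt n input_buffer.reverse (n - 1) PySem.Dict.empty).reverse
    pvBLoop buffer_size input_buffer nxt 0 []

-- ===== PRECONDITION & SPEC =====
def Spec_calculate_perfect_cache_hits (buffer_size : Int) (input_size : Int) (input_buffer : List Int) (out : Int) : Prop := out = calculate_perfect_cache_hits_alt buffer_size input_size input_buffer
instance (buffer_size : Int) (input_size : Int) (input_buffer : List Int) (out : Int) : Decidable (Spec_calculate_perfect_cache_hits buffer_size input_size input_buffer out) := by unfold Spec_calculate_perfect_cache_hits; infer_instance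

-- ===== CLAIM (what is proved, stated in full; the proofs are below) =====
def Claim_equal_calculate_perfect_cache_hits : Prop := ∀ (buffer_size : Int) (input_size : Int) (input_buffer : List Int), Dom_calculate_perfect_cache_hits buffer_size input_size input_buffer → Spec_calculate_perfect_cache_hits buffer_size input_size input_buffer (calculate_perfect_cache_hits buffer_size input_size input_buffer)

-- ===== LEMMAS AND PROOFS =====

-- first occurrence of w in buf at a position ≥ i (absolute), or buf.length if none
def pvF (buf : List Int) (i : Nat) (w : Int) : Int :=
  match PySem.List.index? (buf.drop i) w with
  | some k => ((i + k : Nat) : Int)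
  | none => (buf.length : Int)

lemma pvF_last (buf : List Int) (w : Int) : pvF buf buf.length w = (buf.length : Int) := by
  simp [pvF]

lemma pvF_self {buf : List Int} {i : Nat} {v : Int} {t : List Int}
    (h : buf.drop i = v :: t) : pvF buf i v = (i : Int) := by
  unfold pvF
  rw [h, PySem.List.index?_cons_self]
  simp

lemma pvF_succ_ne {buf : List Int} {i : Nat} {v : Int} {t : List Int}
    (h : buf.drop i = v :: t) {w : Int} (hw : w ≠ v) :
    pvF buf i w = pvF buf (i + 1) w := by
  have ht : buf.drop (i + 1) = t := by
    have hi : i < buf.length := by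
      by_contra hc
      simp [List.drop_eq_nil_of_le (Nat.le_of_not_lt hc)] at h
    rw [List.drop_eq_getElem_cons hi] at h
    exact (List.cons.injEq _ _ _ _ ▸ h).2
  unfold pvF
  rw [h, ht, PySem.List.index?_cons_of_ne t (fun he => hw he.symm)]
  cases hk : PySem.List.index? t w with
  | none => simp
  | some k => simp; omega

lemma pvADist_eq {buf : List Int} {i : Nat} {v : Int} {t : List Int}
    (h : buf.drop i = v :: t) (w : Int) :
    pvADist t w = pvF buf (i + 1) w - ((i : Int) + 1) := by
  have hi : i < buf.length := by
    by_contra hc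
    simp [List.drop_eq_nil_of_le (Nat.le_of_not_lt hc)] at h
  have ht : buf.drop (i + 1) = t := by
    rw [List.drop_eq_getElem_cons hi] at h
    exact (List.cons.injEq _ _ _ _ ▸ h).2
  have hlen : i + 1 + t.length = buf.length := by
    have := congrArg List.length ht
    simp at this
    omega
  unfold pvADist pvF
  rw [ht]
  cases hk : PySem.List.index? t w with
  | none => simp; omega
  | some k => simp

-- insertBy with shifted keys commutes with the shift map
lemma pvInsertBy_shift (c : Int) (x : Int × Int) (ys : List (Int × Int)) :
    PySem.List.insertBy (fun a b : Int × Int => decide (a.2 < b.2))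
        (x.1, x.2 - c) (ys.map (fun e => (e.1, e.2 - c)))
      = (PySem.List.insertBy (fun a b : Int × Int => decide (a.2 < b.2)) x ys).map
          (fun e => (e.1, e.2 - c)) := by
  induction ys with
  | nil => simp [PySem.List.insertBy]
  | cons y ys ih =>
    by_cases h : x.2 < y.2
    · have h' : x.2 - c < y.2 - c := by omega
      simp [PySem.List.insertBy, h, h']
    · have h' : ¬ (x.2 - c < y.2 - c) := by omega
      simp [PySem.List.insertBy, h, h', ih]

-- stable sort by the (·.2) key commutes with shifting all keys by a constant
lemma pvSorted_shift (c : Int) (l : List (Int × Int)) :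
    PySem.List.sorted (l.map (fun e => (e.1, e.2 - c))) (fun e => e.2) false
      = (PySem.List.sorted l (fun e => e.2) false).map (fun e => (e.1, e.2 - c)) := by
  rw [PySem.List.sorted_eq_foldl_insertBy, PySem.List.sorted_eq_foldl_insertBy,
    List.foldl_map]
  suffices h : ∀ (acc : List (Int × Int)),
      l.foldl (fun acc x => PySem.List.insertBy (fun a b : Int × Int => decide (a.2 < b.2))
          ((fun e : Int × Int => (e.1, e.2 - c)) x) acc) (acc.map (fun e => (e.1, e.2 - c)))
        = (l.foldl (fun acc x => PySem.List.insertBy (fun a b : Int × Int => decide (a.2 < b.2)) x acc)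
            acc).map (fun e => (e.1, e.2 - c)) by
    simpa using h []
  induction l with
  | nil => intro acc; simp
  | cons x xs ih =>
    intro acc
    simp only [List.foldl_cons]
    rw [pvInsertBy_shift c x acc, ih]

-- the backward pass computes next-occurrence positions: characterisation
lemma pvBNxt_take (buf : List Int) :
    ∀ (m : Nat), m ≤ buf.length → ∀ (last : PySem.Dict Int Int),
      (∀ w : Int, PySem.Dict.getD last w (buf.length : Int) = pvF buf m w) →
      pvBNxt (buf.length : Int) ((buf.take m).reverse) ((m : Int) - 1) last
        = ((List.range m).map (fun k => pvF buf (k + 1) (buf.getD k 0))).reverse := by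
  intro m
  induction m with
  | zero => intro _ last _; simp [pvBNxt]
  | succ m ih =>
    intro hm last hlast
    have hm' : m < buf.length := by omega
    have htake : (buf.take (m + 1)).reverse = buf[m] :: (buf.take m).reverse := by
      rw [List.take_add_one]
      simp [List.getElem?_eq_getElem hm']
    rw [htake]
    simp only [pvBNxt]
    have hidx : ((m : Int) + 1 - 1 - 1) = (m : Int) - 1 := by ring
    have hget : buf.getD m 0 = buf[m] := by simp [List.getD_eq_getElem?_getD, List.getElem?_eq_getElem hm']
    have hins : ∀ w : Int,
        PySem.Dict.getD (PySem.Dict.insert last buf[m] ((m : Int) + 1 - 1)) w (buf.length : Int)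
          = pvF buf m w := by
      intro w
      have h1 : ((m : Int) + 1 - 1) = (m : Int) := by ring
      rw [PySem.Dict.getD_insert, h1]
      by_cases hwv : w = buf[m]
      · have hdrop : buf.drop m = buf[m] :: buf.drop (m + 1) := List.drop_eq_getElem_cons hm'
        simp [hwv, pvF_self hdrop]
      · have hdrop : buf.drop m = buf[m] :: buf.drop (m + 1) := List.drop_eq_getElem_cons hm'
        rw [if_neg hwv, hlast w, pvF_succ_ne hdrop hwv]
    have hrec := ih (by omega) (PySem.Dict.insert last buf[m] ((m : Int) + 1 - 1)) hins
    push_cast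
    rw [hidx] at *
    rw [hrec, hlast buf[m]]
    rw [List.range_succ]
    simp [List.getD_eq_getElem?_getD, List.getElem?_eq_getElem hm']

-- the nxt list of the B port is exactly the list of next-occurrence positions
lemma pvNxt_eq (buf : List Int) :
    (pvBNxt (buf.length : Int) buf.reverse ((buf.length : Int) - 1) PySem.Dict.empty).reverse
      = (List.range buf.length).map (fun k => pvF buf (k + 1) (buf.getD k 0)) := by
  have h := pvBNxt_take buf buf.length (le_refl _) PySem.Dict.empty
    (by intro w; simpa [PySem.Dict.getD, PySem.Dict.empty] using (pvF_last buf w).symm)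
  rw [List.take_length] at h
  rw [h, List.reverse_reverse]

-- B's inner pass over the cache: hit flag and updated cache in one fold
lemma pvBFold (v nv : Int) (cache : List (Int × Int)) :
    cache.foldl
        (fun (s : Bool × List (Int × Int)) e =>
          if e.1 == v then (true, s.2 ++ [(v, nv)]) else (s.1, s.2 ++ [e]))
        (false, [])
      = (cache.any (fun e => e.1 == v),
         cache.map (fun e => if e.1 = v then (v, nv) else e)) := by
  suffices h : ∀ (b : Bool) (l : List (Int × Int)),
      cache.foldl
          (fun (s : Bool × List (Int × Int)) e =>
            if e.1 == v then (true, s.2 ++ [(v, nv)]) else (s.1, s.2 ++ [e]))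
          (b, l)
        = (b || cache.any (fun e => e.1 == v),
           l ++ cache.map (fun e => if e.1 = v then (v, nv) else e)) by
    simpa using h false []
  induction cache with
  | nil => intro b l; simp
  | cons e es ih =>
    intro b l
    rw [List.foldl_cons]
    by_cases he : e.1 = v
    · have h1 : (if e.1 == v then (true, l ++ [(v, nv)]) else (b, l ++ [e]))
          = (true, l ++ [(v, nv)]) := by simp [he]
      rw [h1, ih]
      simp [he]
    · have h1 : (if e.1 == v then (true, l ++ [(v, nv)]) else (b, l ++ [e]))
          = (b, l ++ [e]) := by simp [he]
      rw [h1, ih]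
      have h2 : (e.1 == v) = false := by simp [he]
      simp [h2, he]

-- main loop correspondence
lemma pvLoop_eq (bs : Int) (buf : List Int) :
    ∀ (rest : List Int) (i : Nat) (hits : Int) (cacheB : List (Int × Int)),
      buf.drop i = rest →
      (∀ e ∈ cacheB, e.2 = pvF buf i e.1) →
      pvALoop bs rest hits (cacheB.map (fun e => (e.1, e.2 - (i : Int))))
        = pvBLoop bs rest (((List.range buf.length).map (fun k => pvF buf (k + 1) (buf.getD k 0))).drop i) hits cacheB := by
  intro rest
  induction rest with
  | nil => intro i hits cacheB _ _; simp [pvALoop, pvBLoop]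
  | cons v t ih =>
    intro i hits cacheB h hinv
    have hi : i < buf.length := by
      by_contra hc
      simp [List.drop_eq_nil_of_le (Nat.le_of_not_lt hc)] at h
    have hv : buf[i] = v := by
      rw [List.drop_eq_getElem_cons hi] at h
      exact (List.cons.injEq _ _ _ _ ▸ h).1
    have ht : buf.drop (i + 1) = t := by
      rw [List.drop_eq_getElem_cons hi] at h
      exact (List.cons.injEq _ _ _ _ ▸ h).2
    set N := (List.range buf.length).map (fun k => pvF buf (k + 1) (buf.getD k 0)) with hN
    have hiN : i < N.length := by simpa [hN]
    have hNi : N[i] = pvF buf (i + 1) v := by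
      simp [hN, List.getD_eq_getElem?_getD, List.getElem?_eq_getElem hi, hv]
    have hdropN : N.drop i = pvF buf (i + 1) v :: N.drop (i + 1) := by
      rw [List.drop_eq_getElem_cons hiN, hNi]
    rw [hdropN]
    -- the next-use position of v after step i
    set nv : Int := pvF buf (i + 1) v with hnv
    -- unfold one step of both loops
    show
      (let p := if v ∈ (cacheB.map (fun e => (e.1, e.2 - (i : Int)))).map (fun e => e.1)
            then (hits + 1, cacheB.map (fun e => (e.1, e.2 - (i : Int))))
            else (hits, cacheB.map (fun e => (e.1, e.2 - (i : Int))) ++ [(v, 0)])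
       let c2 := p.2.map (fun e => (e.1, pvADist t e.1))
       let c3 := PySem.List.sorted c2 (fun e => e.2) false
       let c4 := if bs < (c3.length : Int) then c3.dropLast else c3
       pvALoop bs t p.1 c4)
      =
      (let r := cacheB.foldl
          (fun (s : Bool × List (Int × Int)) e =>
            if e.1 == v then (true, s.2 ++ [(v, nv)]) else (s.1, s.2 ++ [e]))
          (false, [])
       let hits' := if r.1 then hits + 1 else hits
       let c1 := if r.1 then r.2 else r.2 ++ [(v, nv)]
       let c2 := PySem.List.sorted c1 (fun e => e.2) false
       let c3 := if bs < (c2.length : Int) then c2.dropLast else c2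
       pvBLoop bs t (N.drop (i + 1)) hits' c3)
    rw [pvBFold]
    -- the two membership tests agree
    have hfst : (cacheB.map (fun e => (e.1, e.2 - (i : Int)))).map (fun e => e.1)
        = cacheB.map (fun e => e.1) := by
      rw [List.map_map]; rfl
    -- the updated B cache, and the recomputed A cache, entry by entry
    have hkey : ∀ e ∈ cacheB,
        (fun e : Int × Int => (e.1, pvADist t e.1)) e
          = (fun e : Int × Int => (e.1, e.2 - ((i : Int) + 1)))
              ((fun e : Int × Int => if e.1 = v then (v, nv) else e) e) := by
      intro e he
      show (e.1, pvADist t e.1)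
        = ((if e.1 = v then (v, nv) else e).1, (if e.1 = v then (v, nv) else e).2 - ((i : Int) + 1))
      by_cases hev : e.1 = v
      · rw [if_pos hev, pvADist_eq h e.1, hev]
      · rw [if_neg hev, pvADist_eq h e.1, hinv e he, pvF_succ_ne h hev]
    have hupd : (cacheB.map (fun e => (e.1, e.2 - (i : Int)))).map (fun e => (e.1, pvADist t e.1))
        = (cacheB.map (fun e => if e.1 = v then (v, nv) else e)).map
            (fun e => (e.1, e.2 - ((i : Int) + 1))) := by
      rw [List.map_map, List.map_map]
      exact List.map_congr_left hkey
    -- the invariant for the next step, for any sub-collection of the updated cache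
    have hinv1 : ∀ e ∈ (cacheB.map (fun e => if e.1 = v then (v, nv) else e)) ++ [(v, nv)],
        e.2 = pvF buf (i + 1) e.1 := by
      intro e he
      rcases List.mem_append.1 he with he | he
      · rcases List.mem_map.1 he with ⟨e', he', rfl⟩
        by_cases hev : e'.1 = v
        · simp [hev, hnv]
        · simp only [if_neg hev]
          rw [hinv e' he', pvF_succ_ne h hev]
      · simp at he; simp [he, hnv]
    by_cases hmem : v ∈ cacheB.map (fun e => e.1)
    · -- hit in both
      have hb : (cacheB.any (fun e => e.1 == v)) = true := by
        rcases List.mem_map.1 hmem with ⟨e, he, hev⟩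
        exact List.any_eq_true.2 ⟨e, he, by simp [hev]⟩
      rw [hfst, if_pos hmem, hb]
      simp only [if_true]
      rw [hupd, pvSorted_shift ((i : Int) + 1)]
      rw [List.length_map]
      by_cases hlen : bs < ((PySem.List.sorted (cacheB.map (fun e => if e.1 = v then (v, nv) else e)) (fun e => e.2) false).length : Int)
      · rw [if_pos hlen, if_pos hlen, ← List.map_dropLast]
        refine ih (i + 1) (hits + 1) _ ht ?_
        intro e he
        exact hinv1 e (List.mem_append_left _ ((PySem.List.mem_sorted _ _ _ _).1 (List.mem_of_mem_dropLast he)))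
      · rw [if_neg hlen, if_neg hlen]
        refine ih (i + 1) (hits + 1) _ ht ?_
        intro e he
        exact hinv1 e (List.mem_append_left _ ((PySem.List.mem_sorted _ _ _ _).1 he))
    · -- miss in both
      have hb : (cacheB.any (fun e => e.1 == v)) = false := by
        simp only [List.any_eq_false]
        intro e he
        simp only [beq_iff_eq]
        intro hev
        exact hmem (List.mem_map.2 ⟨e, he, hev⟩)
      rw [hfst, if_neg hmem, hb]
      simp only [Bool.false_eq_true, if_false]
      have happ : ((cacheB.map (fun e : Int × Int => (e.1, e.2 - (i : Int)))) ++ [((v : Int), (0 : Int))]).map (fun e : Int × Int => (e.1, pvADist t e.1))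
          = ((cacheB.map (fun e : Int × Int => if e.1 = v then (v, nv) else e)) ++ [(v, nv)]).map
              (fun e : Int × Int => (e.1, e.2 - ((i : Int) + 1))) := by
        rw [List.map_append, List.map_append, hupd]
        congr 1
        simp only [List.map_cons, List.map_nil]
        rw [pvADist_eq h v, hnv]
      rw [happ, pvSorted_shift ((i : Int) + 1)]
      rw [List.length_map]
      by_cases hlen : bs < ((PySem.List.sorted ((cacheB.map (fun e => if e.1 = v then (v, nv) else e)) ++ [(v, nv)]) (fun e => e.2) false).length : Int)
      · rw [if_pos hlen, if_pos hlen, ← List.map_dropLast]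
        refine ih (i + 1) hits _ ht ?_
        intro e he
        exact hinv1 e ((PySem.List.mem_sorted _ _ _ _).1 (List.mem_of_mem_dropLast he))
      · rw [if_neg hlen, if_neg hlen]
        refine ih (i + 1) hits _ ht ?_
        intro e he
        exact hinv1 e ((PySem.List.mem_sorted _ _ _ _).1 he)

theorem pv_main (bs isz : Int) (buf : List Int) :
    calculate_perfect_cache_hits bs isz buf = calculate_perfect_cache_hits_alt bs isz buf := by
  unfold calculate_perfect_cache_hits calculate_perfect_cache_hits_alt
  by_cases h : (buf.length : Int) ≠ isz
  · simp [h]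
  · simp only [h, if_false]
    rw [pvNxt_eq buf]
    have := pvLoop_eq bs buf buf 0 0 [] (by simp) (by simp)
    simpa using this

-- ===== VERDICT (by name: the statement is the Claim_ definition above) =====
theorem calculate_perfect_cache_hits_spec : Claim_equal_calculate_perfect_cache_hits := by
  intro bs isz buf _
  unfold Spec_calculate_perfect_cache_hits
  exact pv_main bs isz buf
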